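-- pv_equiv track=rewrite | github.com/kyoxiaomao/AgentsShop | datacenter/server.py | _diff_text
-- ===== SOURCE A (Python) =====
-- def _diff_text(next_text: str, prev_text: str) -> str:
--     if not next_text:
--         return ""
--     if next_text.startswith(prev_text):
--         return next_text[len(prev_text) :]
--     max_len = min(len(next_text), len(prev_text))
--     idx = 0
--     while idx < max_len and next_text[idx] == prev_text[idx]:
--         idx += 1
--     return next_text[idx:]
-- ===== SOURCE B (Python) =====
-- def _diff_text(next_text: str, prev_text: str) -> str:
--     lo, hi = 0, min(len(next_text), len(prev_text))
--     while lo < hi: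
--         mid = (lo + hi + 1) // 2
--         if next_text[:mid] == prev_text[:mid]:
--             lo = mid
--         else:
--             hi = mid - 1
--     return next_text[lo:]
-- ===== Notes on version B (the rewrite author's own statement) =====
-- stated objective: alternative
-- what changed: B finds the common-prefix length by binary search over slice equality (largest k with next_text[:k] == prev_text[:k], using that prefix equality is monotone in k) instead of A's character-by-character index walk with empty-input and startswith special cases, then slices once.
import Mathlib
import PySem

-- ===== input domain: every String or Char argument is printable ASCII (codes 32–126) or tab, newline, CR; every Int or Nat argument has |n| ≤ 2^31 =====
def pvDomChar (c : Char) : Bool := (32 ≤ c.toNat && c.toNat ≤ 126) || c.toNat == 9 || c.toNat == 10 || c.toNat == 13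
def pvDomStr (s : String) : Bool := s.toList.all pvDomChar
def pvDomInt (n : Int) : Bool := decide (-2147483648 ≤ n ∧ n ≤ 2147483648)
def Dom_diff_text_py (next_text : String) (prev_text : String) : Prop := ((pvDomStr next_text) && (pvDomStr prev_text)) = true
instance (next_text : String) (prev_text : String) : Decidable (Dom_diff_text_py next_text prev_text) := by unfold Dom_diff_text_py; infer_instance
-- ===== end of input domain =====

-- B finds the common-prefix length by BINARY SEARCH over slice equality (prefix equality is
-- monotone in the length), replacing A's char-by-char index walk and its special cases
-- (objective: alternative; same result, different algorithm).


-- ===== PORT A =====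
-- A's while loop: advance idx while idx < maxLen and next[idx] == prev[idx]
def pvAWhile (n p : List Char) (maxLen : Nat) (idx : Nat) : Nat :=
  if idx < maxLen ∧ PySem.List.pyGet? n (idx : Int) = PySem.List.pyGet? p (idx : Int) then
    pvAWhile n p maxLen (idx + 1)
  else idx
termination_by maxLen - idx
decreasing_by omega

def diff_text_py (next_text : String) (prev_text : String) : String :=
  if next_text.toList = [] then ""
  else if PySem.Chars.startswith next_text.toList prev_text.toList then
    String.ofList (PySem.Chars.slice next_text.toList (some (prev_text.toList.length : Int)) none)
  else
    String.ofList (PySem.Chars.slice next_text.toList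
      (some ((pvAWhile next_text.toList prev_text.toList
        (min next_text.toList.length prev_text.toList.length) 0 : Nat) : Int)) none)

-- ===== PORT B =====
-- B's binary-search loop: lo/hi bracket the largest k with next[:k] == prev[:k]
def pvBsearch (n p : List Char) (lo hi : Nat) : Nat :=
  if lo < hi then
    let mid := (lo + hi + 1) / 2
    if PySem.Chars.slice n none (some (mid : Int)) = PySem.Chars.slice p none (some (mid : Int)) then
      pvBsearch n p mid hi
    else
      pvBsearch n p lo (mid - 1)
  else lo
termination_by hi - lo
decreasing_by all_goals omega

def diff_text_py_alt (next_text : String) (prev_text : String) : String :=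
  String.ofList (PySem.Chars.slice next_text.toList
    (some ((pvBsearch next_text.toList prev_text.toList 0
      (min next_text.toList.length prev_text.toList.length) : Nat) : Int)) none)

-- ===== PRECONDITION & SPEC =====
def Spec_diff_text_py (next_text : String) (prev_text : String) (out : String) : Prop := out = diff_text_py_alt next_text prev_text
instance (next_text : String) (prev_text : String) (out : String) : Decidable (Spec_diff_text_py next_text prev_text out) := by unfold Spec_diff_text_py; infer_instance

-- ===== CLAIM (what is proved, stated in full; the proofs are below) =====
def Claim_equal_diff_text_py : Prop := ∀ (next_text : String) (prev_text : String), Dom_diff_text_py next_text prev_text → Spec_diff_text_py next_text prev_text (diff_text_py next_text prev_text)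

-- ===== LEMMAS AND PROOFS =====

-- length of the common prefix of two lists
def pvCpl : List Char → List Char → Nat
  | a :: as, b :: bs => if a = b then pvCpl as bs + 1 else 0
  | _, _ => 0

theorem pvCpl_nil_right (as : List Char) : pvCpl as [] = 0 := by
  cases as <;> simp [pvCpl]

theorem pvCpl_le_left : ∀ (n p : List Char), pvCpl n p ≤ n.length := by
  intro n
  induction n with
  | nil => intro p; cases p <;> simp [pvCpl]
  | cons a as ih =>
    intro p
    cases p with
    | nil => simp [pvCpl]
    | cons b bs =>
      by_cases h : a = b
      · simpa [pvCpl, h] using ih bs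
      · simp [pvCpl, h]

theorem pvCpl_of_prefix (p : List Char) : ∀ n, p <+: n → pvCpl n p = p.length := by
  induction p with
  | nil => intro n _; cases n <;> simp [pvCpl]
  | cons b bs ih =>
    intro n h
    obtain ⟨t, ht⟩ := h
    subst ht
    simp only [List.cons_append, pvCpl, List.length_cons, if_true]
    rw [ih (bs ++ t) ⟨t, rfl⟩]

-- prefix equality is monotone: take k agrees exactly when k ≤ common prefix length
theorem pvTake_eq_iff : ∀ (k : Nat) (n p : List Char), k ≤ n.length → k ≤ p.length →
    (n.take k = p.take k ↔ k ≤ pvCpl n p) := by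
  intro k
  induction k with
  | zero => intro n p _ _; simp
  | succ k ih =>
    intro n p hn hp
    cases n with
    | nil => simp at hn
    | cons a as =>
      cases p with
      | nil => simp at hp
      | cons b bs =>
        simp only [List.take_succ_cons, List.cons.injEq, pvCpl]
        by_cases hab : a = b
        · subst hab
          rw [if_pos rfl]
          simp only [true_and]
          rw [ih as bs (by simpa using hn) (by simpa using hp)]
          omega
        · simp [hab]

theorem pvBsearch_eq (n p : List Char) : ∀ (lo hi : Nat),
    lo ≤ pvCpl n p → pvCpl n p ≤ hi → hi ≤ min n.length p.length →
    pvBsearch n p lo hi = pvCpl n p := by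
  intro lo hi
  fun_induction pvBsearch n p lo hi with
  | case1 lo hi hlt mid heq ih =>
    intro hlo hhi hmin
    apply ih
    · rw [PySem.Chars.slice_eq_listSlice, PySem.Chars.slice_eq_listSlice,
        PySem.List.slice_to_natCast, PySem.List.slice_to_natCast] at heq
      exact (pvTake_eq_iff mid n p (by omega) (by omega)).mp heq
    · exact hhi
    · exact hmin
  | case2 lo hi hlt mid heq ih =>
    intro hlo hhi hmin
    apply ih
    · exact hlo
    · rw [PySem.Chars.slice_eq_listSlice, PySem.Chars.slice_eq_listSlice,
        PySem.List.slice_to_natCast, PySem.List.slice_to_natCast] at heq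
      have : ¬ mid ≤ pvCpl n p := fun h => heq ((pvTake_eq_iff mid n p (by omega) (by omega)).mpr h)
      omega
    · omega
  | case3 lo hi hge =>
    intro hlo hhi _
    omega

-- A's while loop computes the common prefix length (from any start index)
theorem pvAWhile_eq (n p : List Char) (i : Nat) :
    pvAWhile n p (min n.length p.length) i = i + pvCpl (n.drop i) (p.drop i) := by
  fun_induction pvAWhile n p (min n.length p.length) i with
  | case1 idx h ih =>
    obtain ⟨hlt, heq⟩ := h
    have hn : idx < n.length := by omega
    have hp : idx < p.length := by omega
    rw [ih]
    rw [List.drop_eq_getElem_cons hn, List.drop_eq_getElem_cons hp]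
    have hchar : n[idx] = p[idx] := by
      simpa [PySem.List.pyGet?_natCast, List.getElem?_eq_getElem, hn, hp] using heq
    simp [pvCpl, hchar]
    omega
  | case2 idx h =>
    rw [not_and_or] at h
    rcases h with h | h
    · have : n.length ≤ idx ∨ p.length ≤ idx := by omega
      rcases this with h' | h'
      · rw [List.drop_eq_nil_iff.mpr h']
        simp [pvCpl]
      · rw [List.drop_eq_nil_iff.mpr h', pvCpl_nil_right]
        omega
    · by_cases hlt : idx < min n.length p.length
      · have hn : idx < n.length := by omega
        have hp : idx < p.length := by omega
        rw [List.drop_eq_getElem_cons hn, List.drop_eq_getElem_cons hp]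
        have hchar : n[idx] ≠ p[idx] := by
          intro hc
          exact h (by simp [hn, hp, hc])
        simp [pvCpl, hchar]
      · have : n.length ≤ idx ∨ p.length ≤ idx := by omega
        rcases this with h' | h'
        · rw [List.drop_eq_nil_iff.mpr h']
          simp [pvCpl]
        · rw [List.drop_eq_nil_iff.mpr h', pvCpl_nil_right]
          omega

theorem pvCpl_le_min (n p : List Char) : pvCpl n p ≤ min n.length p.length := by
  have h1 := pvCpl_le_left n p
  have h2 : pvCpl n p ≤ p.length := by
    have : ∀ (a b : List Char), pvCpl a b = pvCpl b a := by
      intro a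
      induction a with
      | nil => intro b; cases b <;> simp [pvCpl]
      | cons x xs ih =>
        intro b
        cases b with
        | nil => simp [pvCpl]
        | cons y ys =>
          by_cases h : x = y
          · simp [pvCpl, h, ih ys]
          · simp [pvCpl, h, Ne.symm h]
    rw [this]
    exact pvCpl_le_left p n
  omega

theorem pvAlt_eq (next_text prev_text : String) :
    diff_text_py_alt next_text prev_text =
      String.ofList (next_text.toList.drop (pvCpl next_text.toList prev_text.toList)) := by
  unfold diff_text_py_alt
  rw [pvBsearch_eq next_text.toList prev_text.toList 0
    (min next_text.toList.length prev_text.toList.length)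
    (Nat.zero_le _) (pvCpl_le_min _ _) le_rfl]
  simp [PySem.Chars.slice_eq_listSlice, PySem.List.slice_from_natCast]

-- ===== VERDICT (by name: the statement is the Claim_ definition above) =====
theorem diff_text_py_spec : Claim_equal_diff_text_py := by
  intro next_text prev_text _
  unfold Spec_diff_text_py
  rw [pvAlt_eq]
  unfold diff_text_py
  by_cases hnil : next_text.toList = []
  · rw [if_pos hnil, hnil]
    rfl
  · rw [if_neg hnil]
    by_cases hsw : PySem.Chars.startswith next_text.toList prev_text.toList = true
    · rw [if_pos hsw]
      have hpre : prev_text.toList <+: next_text.toList := (PySem.Chars.startswith_iff _ _).mp hsw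
      rw [pvCpl_of_prefix _ _ hpre]
      simp [PySem.Chars.slice_eq_listSlice, PySem.List.slice_from_natCast]
    · rw [if_neg hsw]
      rw [pvAWhile_eq]
      simp [PySem.Chars.slice_eq_listSlice, PySem.List.slice_from_natCast]
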